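-- pv_equiv track=rewrite | github.com/Torato-Taraka/AI_study_record | 社会计算大作业20191224/establish.py | list_re_classification
-- ===== SOURCE A (Python) =====
-- def list_re_classification(lists, labels):
--     #最终建立的与话题域对应的分词表
--     final_lists = []
--     #类指针
--     topic_point = 0
--
--     for i in range(len(labels)):
--         if (i == 0) or (i > 0 and labels[i] != labels[i - 1]) :
--             #如果两个相邻分词行属于同一个话题域，那么就延展该话题域
--             #此处用+=是在同一行后面延伸
--             final_lists.append(lists[i])
--             topic_point += 1
--         else:
--             #如果两个相邻分词行不属于同一个话题域，那么就新建话题域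
--             #此处用append，是在list中新加一行列表元素
--             final_lists[topic_point - 1] = final_lists[topic_point - 1] + lists[i]
--
--     return final_lists
-- ===== SOURCE B (Python) =====
-- def list_re_classification(lists, labels):
--     # Divide and conquer: split the label range in half, classify each half
--     # independently, then join at the seam (merging the boundary groups when
--     # the labels on both sides of the split are equal). Concatenation uses +,
--     # so the argument lists are never mutated.
--     n = len(labels)
--     if n == 0:
--         return []
--     if n == 1:
--         return [list(lists[0])]
--     m = n // 2
--     left = list_re_classification(lists[:m], labels[:m])
--     right = list_re_classification(lists[m:n], labels[m:n])
--     if labels[m - 1] == labels[m]: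
--         return left[:-1] + [left[-1] + right[0]] + right[1:]
--     return left + right
-- ===== Notes on version B (the rewrite author's own statement) =====
-- stated objective: alternative
-- what changed: Replaces A's single left-to-right pointer-and-branch loop by a divide-and-conquer recursion: split the index range in half, classify each half independently, and join the two results at the seam, merging the boundary groups when the labels on both sides of the split are equal.
import Mathlib
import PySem

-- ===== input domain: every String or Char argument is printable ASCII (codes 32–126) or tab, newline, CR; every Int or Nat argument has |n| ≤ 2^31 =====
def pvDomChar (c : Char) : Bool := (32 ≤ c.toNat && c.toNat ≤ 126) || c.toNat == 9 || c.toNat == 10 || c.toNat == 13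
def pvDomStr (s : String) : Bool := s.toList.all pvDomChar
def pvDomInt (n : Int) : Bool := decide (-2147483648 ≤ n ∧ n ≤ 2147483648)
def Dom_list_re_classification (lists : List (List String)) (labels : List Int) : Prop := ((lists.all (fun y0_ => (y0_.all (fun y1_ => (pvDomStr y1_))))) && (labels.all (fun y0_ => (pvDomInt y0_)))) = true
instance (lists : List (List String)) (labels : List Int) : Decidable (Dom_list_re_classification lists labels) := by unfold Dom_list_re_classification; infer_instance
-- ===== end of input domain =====

-- B replaces A's pointer-and-branch loop by a divide-and-conquer recursion (split the
-- index range in half, classify each half, join at the seam); objective: alternative, not faster.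


-- ===== PORT A =====
-- one loop iteration of A's for; state = (final_lists, topic_point)
def pvStepA (lists : List (List String)) (labels : List Int)
    (st : List (List String) × Int) (i : Int) : List (List String) × Int :=
  let fl := st.1
  let tp := st.2
  if i = 0 ∨ (0 < i ∧ PySem.List.pyGetD labels i 0 ≠ PySem.List.pyGetD labels (i - 1) 0) then
    (fl ++ [PySem.List.pyGetD lists i []], tp + 1)
  else
    -- final_lists[topic_point-1] = final_lists[topic_point-1] + lists[i]
    -- topic_point-1 is ≥ 0 on every reachable state, so .toNat indexing is exact here
    (fl.set (tp - 1).toNat ((fl.getD (tp - 1).toNat []) ++ PySem.List.pyGetD lists i []), tp)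

def list_re_classification (lists : List (List String)) (labels : List Int) : List (List String) :=
  ((PySem.List.pyRange 0 (labels.length : Int) 1).foldl (pvStepA lists labels) ([], 0)).1

-- ===== PORT B =====
-- divide and conquer (Source B): split in half, recurse on both halves, join at the seam.
-- left[-1]/right[0]/left[:-1]/right[1:] are ported with defaulting accessors; within
-- Pre_ both halves' results are nonempty, so the defaults are never the returned value.
def pvAltGo (fuel : Nat) (lists : List (List String)) (labels : List Int) : List (List String) :=
  match fuel with
  | 0 => []
  | fuel + 1 =>
  let n := labels.length
  if n = 0 then []
  else if n = 1 then [PySem.List.pyGetD lists 0 []]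
  else
    let m := n / 2
    let left := pvAltGo fuel
      (PySem.List.slice lists none (some (m : Int)))
      (PySem.List.slice labels none (some (m : Int)))
    let right := pvAltGo fuel
      (PySem.List.slice lists (some (m : Int)) (some (n : Int)))
      (PySem.List.slice labels (some (m : Int)) (some (n : Int)))
    if PySem.List.pyGetD labels ((m : Int) - 1) 0 = PySem.List.pyGetD labels (m : Int) 0 then
      PySem.List.slice left none (some (-1))
        ++ [PySem.List.pyGetD left (-1) [] ++ PySem.List.pyGetD right 0 []]
        ++ PySem.List.slice right (some 1) none
    else left ++ right

def list_re_classification_alt (lists : List (List String)) (labels : List Int) : List (List String) :=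
  pvAltGo labels.length lists labels

-- ===== PRECONDITION & SPEC =====
-- A (and B) raises IndexError at lists[i] when labels is longer than lists
def Pre_list_re_classification (lists : List (List String)) (labels : List Int) : Prop :=
  labels.length ≤ lists.length
instance (lists : List (List String)) (labels : List Int) : Decidable (Pre_list_re_classification lists labels) := by unfold Pre_list_re_classification; infer_instance

def pvWitness_list_re_classification : List (List String) × List Int :=
  ([["a"], ["b", "c"], ["d"]], [1, 1, 2])

def Spec_list_re_classification (lists : List (List String)) (labels : List Int) (out : List (List String)) : Prop := out = list_re_classification_alt lists labels
instance (lists : List (List String)) (labels : List Int) (out : List (List String)) : Decidable (Spec_list_re_classification lists labels out) := by unfold Spec_list_re_classification; infer_instance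

-- ===== CLAIM (what is proved, stated in full; the proofs are below) =====
def Claim_equal_list_re_classification : Prop := ∀ (lists : List (List String)) (labels : List Int), Dom_list_re_classification lists labels → Pre_list_re_classification lists labels → Spec_list_re_classification lists labels (list_re_classification lists labels)

-- ===== LEMMAS AND PROOFS =====

-- canonical middle form #1 (A side): structural recursion over the label suffix,
-- carrying the previous label and the current (open) group
def pvMergeS (lists : List (List String)) (prev : Int) (cur : List String) (j : Nat) :
    List Int → List (List String)
  | [] => [cur]
  | l :: ls =>
    if l = prev then pvMergeS lists l (cur ++ lists.getD j []) (j + 1) ls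
    else cur :: pvMergeS lists l (lists.getD j []) (j + 1) ls

-- canonical middle form #2: positional grouping of rows by runs of equal labels
def pvGrp : List (List String) → List Int → List (List String)
  | _, [] => []
  | rows, l :: ls =>
    if ls.head? = some l then
      ((rows.headD []) ++ (pvGrp rows.tail ls).headD []) :: (pvGrp rows.tail ls).tail
    else (rows.headD []) :: pvGrp rows.tail ls

theorem pvGrp_ne_nil (rows : List (List String)) (l : Int) (ls : List Int) :
    pvGrp rows (l :: ls) ≠ [] := by
  unfold pvGrp; split <;> simp

theorem pvGrp_take (ls : List Int) : ∀ (rows : List (List String)) (k : Nat),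
    ls.length ≤ k → pvGrp (rows.take k) ls = pvGrp rows ls := by
  induction ls with
  | nil => intro rows k _; simp [pvGrp]
  | cons l ls ih =>
    intro rows k h
    simp only [List.length_cons] at h
    have h1 : (rows.take k).headD [] = rows.headD [] := by
      cases rows with
      | nil => simp
      | cons r rs => cases k with
        | zero => omega
        | succ k' => simp
    have h2 : (rows.take k).tail = rows.tail.take (k - 1) := by
      cases rows with
      | nil => simp
      | cons r rs => cases k with
        | zero => omega
        | succ k' => simp
    rw [pvGrp, pvGrp, h1, h2, ih rows.tail (k - 1) (by omega)]

theorem pvHeadD_drop (lists : List (List String)) (j : Nat) :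
    (lists.drop j).headD [] = lists.getD j [] := by
  rw [List.getD_eq_getElem?_getD, ← List.head?_drop]
  cases lists.drop j <;> simp

theorem pvMergeS_grp (lists : List (List String)) : ∀ (ls : List Int) (prev : Int)
    (cur : List String) (j : Nat),
    pvMergeS lists prev cur j ls =
      if ls.head? = some prev then
        (cur ++ (pvGrp (lists.drop j) ls).headD []) :: (pvGrp (lists.drop j) ls).tail
      else cur :: pvGrp (lists.drop j) ls := by
  intro ls
  induction ls with
  | nil => intro prev cur j; simp [pvMergeS, pvGrp]
  | cons l ls' ih =>
    intro prev cur j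
    have htail : (lists.drop j).tail = lists.drop (j + 1) := by
      rw [List.tail_drop]
    have hgrp : pvGrp (lists.drop j) (l :: ls') =
        if ls'.head? = some l then
          (lists.getD j [] ++ (pvGrp (lists.drop (j + 1)) ls').headD []) ::
            (pvGrp (lists.drop (j + 1)) ls').tail
        else lists.getD j [] :: pvGrp (lists.drop (j + 1)) ls' := by
      rw [pvGrp, pvHeadD_drop, htail]
    by_cases hl : l = prev
    · subst hl
      rw [show pvMergeS lists l cur j (l :: ls')
          = pvMergeS lists l (cur ++ lists.getD j []) (j + 1) ls' from by
        simp [pvMergeS]]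
      rw [ih, hgrp]
      by_cases hc : ls'.head? = some l
      · simp [hc]
      · simp [hc]
    · rw [show pvMergeS lists prev cur j (l :: ls')
          = cur :: pvMergeS lists l (lists.getD j []) (j + 1) ls' from by
        simp [pvMergeS, hl]]
      rw [ih, hgrp]
      by_cases hc : ls'.head? = some l
      · simp [hc, hl]
      · simp [hc, hl]

-- the seam: grouping a concatenation = grouping the halves, joined at the boundary
theorem pvGrp_append : ∀ (u : List Int) (a : List (List String)) (v : List Int)
    (b : List (List String)), a.length = u.length → u ≠ [] → v ≠ [] →
    pvGrp (a ++ b) (u ++ v) =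
      if u.getLastD 0 = v.headD 0 then
        (pvGrp a u).dropLast
          ++ ((pvGrp a u).getLastD [] ++ (pvGrp b v).headD []) :: (pvGrp b v).tail
      else pvGrp a u ++ pvGrp b v := by
  intro u
  induction u with
  | nil => intro a v b _ hu _; exact absurd rfl hu
  | cons l1 u' ih =>
    intro a v b hlen hu hv
    obtain ⟨r1, a', rfl⟩ : ∃ r1 a', a = r1 :: a' := by
      cases a with
      | nil => simp at hlen
      | cons x xs => exact ⟨x, xs, rfl⟩
    have hlen' : a'.length = u'.length := by simpa using hlen
    obtain ⟨p, ps, rfl⟩ : ∃ p ps, v = p :: ps := by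
      cases v with
      | nil => exact absurd rfl hv
      | cons x xs => exact ⟨x, xs, rfl⟩
    cases u' with
    | nil =>
      have ha' : a' = [] := List.length_eq_zero_iff.mp (by simpa using hlen')
      subst ha'
      have hL : pvGrp [r1] [l1] = [r1] := by simp [pvGrp]
      have hLHS : pvGrp ([r1] ++ b) ([l1] ++ p :: ps) =
          if p = l1 then
            (r1 ++ (pvGrp b (p :: ps)).headD []) :: (pvGrp b (p :: ps)).tail
          else r1 :: pvGrp b (p :: ps) := by
        rw [show ([r1] ++ b : List (List String)) = r1 :: b from rfl,
            show ([l1] ++ p :: ps : List Int) = l1 :: p :: ps from rfl, pvGrp]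
        simp
      rw [hLHS, hL]
      by_cases hc : l1 = p
      · subst hc
        rw [if_pos rfl, if_pos (by simp)]
        simp
      · rw [if_neg (fun h => hc h.symm), if_neg (by simpa using hc)]
        simp
    | cons q us' =>
      obtain ⟨x, L'', hL'⟩ : ∃ x L'', pvGrp a' (q :: us') = x :: L'' := by
        cases h : pvGrp a' (q :: us') with
        | nil => exact absurd h (pvGrp_ne_nil a' q us')
        | cons x xs => exact ⟨x, xs, rfl⟩
      have hR := ih a' (p :: ps) b hlen' (by simp) (by simp)
      have hLHS : pvGrp ((r1 :: a') ++ b) ((l1 :: q :: us') ++ p :: ps) =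
          if q = l1 then
            (r1 ++ (pvGrp (a' ++ b) ((q :: us') ++ p :: ps)).headD []) ::
              (pvGrp (a' ++ b) ((q :: us') ++ p :: ps)).tail
          else r1 :: pvGrp (a' ++ b) ((q :: us') ++ p :: ps) := by
        rw [show ((r1 :: a') ++ b : List (List String)) = r1 :: (a' ++ b) from rfl,
            show ((l1 :: q :: us') ++ p :: ps : List Int)
              = l1 :: ((q :: us') ++ p :: ps) from rfl, pvGrp]
        simp
      have hL : pvGrp (r1 :: a') (l1 :: q :: us') =
          if q = l1 then
            (r1 ++ (pvGrp a' (q :: us')).headD []) :: (pvGrp a' (q :: us')).tail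
          else r1 :: pvGrp a' (q :: us') := by
        rw [pvGrp]; simp
      have hcondL : ((l1 :: q :: us').getLastD 0 = (p :: ps).headD 0)
          ↔ ((q :: us').getLastD 0 = (p :: ps).headD 0) := by
        simp
      rw [hLHS, hL]
      by_cases c2 : (q :: us').getLastD 0 = (p :: ps).headD 0
      · rw [if_pos (hcondL.mpr c2)]
        rw [if_pos c2] at hR
        by_cases c1 : q = l1
        · rw [if_pos c1, if_pos c1, hR, hL']
          cases L'' with
          | nil => simp
          | cons y ys => simp
        · rw [if_neg c1, if_neg c1, hR, hL']
          cases L'' with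
          | nil => simp
          | cons y ys => simp
      · rw [if_neg (fun h => c2 (hcondL.mp h))]
        rw [if_neg c2] at hR
        by_cases c1 : q = l1
        · rw [if_pos c1, if_pos c1, hR, hL']
          simp
        · rw [if_neg c1, if_neg c1, hR]
          simp

theorem pvSetLen (done : List (List String)) (cur v : List String) :
    (done ++ [cur]).set done.length v = done ++ [v] := by
  induction done with
  | nil => rfl
  | cons d ds ih => simp [ih]

theorem pvGetDAppendLen (done : List (List String)) (cur : List String) :
    (done ++ [cur]).getD done.length [] = cur := by
  simp [List.getD_eq_getElem?_getD]

-- A side: the loop from index j with accumulator done ++ [cur] computes done ++ mergeS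
theorem pvLoopA (lists : List (List String)) (labels : List Int) :
    ∀ (ls : List Int) (j : Nat) (done : List (List String)) (cur : List String),
      labels.drop j = ls → 1 ≤ j →
      ((PySem.List.pyRange (j : Int) (labels.length : Int) 1).foldl (pvStepA lists labels)
          (done ++ [cur], (done.length : Int) + 1)).1
        = done ++ pvMergeS lists (labels.getD (j - 1) 0) cur j ls := by
  intro ls
  induction ls with
  | nil =>
    intro j done cur hdrop hj
    have hlen : labels.length ≤ j := by
      by_contra h
      have := congrArg List.length hdrop
      simp at this
      omega
    rw [PySem.List.pyRange_one_eq_nil (by exact_mod_cast hlen)]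
    simp [pvMergeS]
  | cons l ls' ih =>
    intro j done cur hdrop hj
    have hjlt : j < labels.length := by
      by_contra h
      rw [List.drop_eq_nil_of_le (by omega)] at hdrop
      simp at hdrop
    have hget : labels.getD j 0 = l := by
      have h1 : labels[j]? = some l := by
        rw [← List.head?_drop, hdrop]; rfl
      simp [List.getD_eq_getElem?_getD, h1]
    have hdrop' : labels.drop (j + 1) = ls' := by
      have h1 : (labels.drop j).drop 1 = labels.drop (j + 1) := by
        rw [List.drop_drop]
      rw [← h1, hdrop]; rfl
    rw [PySem.List.pyRange_one_cons (by exact_mod_cast hjlt)]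
    simp only [List.foldl_cons]
    have hgj : PySem.List.pyGetD labels (j : Int) 0 = l := by
      rw [PySem.List.pyGetD_natCast]; exact hget
    have hgj1 : PySem.List.pyGetD labels ((j : Int) - 1) 0 = labels.getD (j - 1) 0 := by
      have : ((j : Int) - 1) = ((j - 1 : Nat) : Int) := by omega
      rw [this, PySem.List.pyGetD_natCast]
    have hlj : PySem.List.pyGetD lists (j : Int) [] = lists.getD j [] := by
      rw [PySem.List.pyGetD_natCast]
    by_cases hlp : l = labels.getD (j - 1) 0
    · -- same label: else branch, extend the last cell
      have hcond : ¬ ((j : Int) = 0 ∨ (0 < (j : Int) ∧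
          PySem.List.pyGetD labels (j : Int) 0 ≠ PySem.List.pyGetD labels ((j : Int) - 1) 0)) := by
        rw [hgj, hgj1]
        rintro (h0 | ⟨-, hne⟩)
        · omega
        · exact hne hlp
      rw [show pvStepA lists labels (done ++ [cur], (done.length : Int) + 1) (j : Int)
          = (done ++ [cur ++ lists.getD j []], (done.length : Int) + 1) from by
        simp only [pvStepA, if_neg hcond, hlj]
        have ht : (((done.length : Int) + 1) - 1).toNat = done.length := by omega
        rw [ht, pvSetLen, pvGetDAppendLen]]
      have ihh := ih (j + 1) done (cur ++ lists.getD j []) hdrop' (by omega)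
      push_cast at ihh
      rw [ihh]
      have hthis : pvMergeS lists (labels.getD (j - 1) 0) cur j (l :: ls')
          = pvMergeS lists l (cur ++ lists.getD j []) (j + 1) ls' := by
        simp only [pvMergeS]
        rw [if_pos hlp]
      rw [hthis]
      have hget' : labels[j]?.getD 0 = l := by simpa [List.getD_eq_getElem?_getD] using hget
      simp [hget']
    · -- new label: then branch, append a new cell
      have hcond : ((j : Int) = 0 ∨ (0 < (j : Int) ∧
          PySem.List.pyGetD labels (j : Int) 0 ≠ PySem.List.pyGetD labels ((j : Int) - 1) 0)) := by
        rw [hgj, hgj1]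
        exact Or.inr ⟨by omega, hlp⟩
      rw [show pvStepA lists labels (done ++ [cur], (done.length : Int) + 1) (j : Int)
          = ((done ++ [cur]) ++ [lists.getD j []], ((done ++ [cur]).length : Int) + 1) from by
        simp only [pvStepA, if_pos hcond, hlj]
        simp]
      have ihh := ih (j + 1) (done ++ [cur]) (lists.getD j []) hdrop' (by omega)
      push_cast at ihh
      rw [ihh]
      have hthis : pvMergeS lists (labels.getD (j - 1) 0) cur j (l :: ls')
          = cur :: pvMergeS lists l (lists.getD j []) (j + 1) ls' := by
        simp only [pvMergeS]
        rw [if_neg hlp]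
      rw [hthis]
      have hget' : labels[j]?.getD 0 = l := by simpa [List.getD_eq_getElem?_getD] using hget
      simp [hget']

-- A = pvGrp
theorem pvA_grp (lists : List (List String)) (labels : List Int) :
    list_re_classification lists labels = pvGrp lists labels := by
  cases labels with
  | nil =>
    simp [list_re_classification, pvGrp, PySem.List.pyRange_one_eq_nil]
  | cons l0 rest =>
    unfold list_re_classification
    rw [PySem.List.pyRange_one_cons (by simp)]
    simp only [List.foldl_cons]
    have hstep : pvStepA lists (l0 :: rest) ([], 0) 0 = ([lists.getD 0 []], 1) := by
      simp [pvStepA, PySem.List.pyGetD_zero]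
    rw [hstep]
    have hl := pvLoopA lists (l0 :: rest) rest 1 [] (lists.getD 0 []) (by simp) (le_refl 1)
    simp only [List.nil_append, List.length_nil, Nat.cast_zero, zero_add] at hl
    have h01 : ((0 : Int) + 1) = ((1 : Nat) : Int) := by norm_num
    rw [h01, hl]
    have hg0 : (l0 :: rest).getD (1 - 1) 0 = l0 := rfl
    rw [hg0, pvMergeS_grp]
    rw [show pvGrp lists (l0 :: rest)
        = if rest.head? = some l0 then
            (lists.headD [] ++ (pvGrp lists.tail rest).headD []) :: (pvGrp lists.tail rest).tail
          else lists.headD [] :: pvGrp lists.tail rest from by rw [pvGrp]]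
    have e1 : lists.getD 0 [] = lists.headD [] := by cases lists <;> simp
    have e2 : lists.drop 1 = lists.tail := List.drop_one
    rw [e1, e2]

-- B = pvGrp on Pre_
theorem pvGetDLast (labels : List Int) (m : Nat) (h1 : 1 ≤ m) (h2 : m ≤ labels.length) :
    (labels.take m).getLastD 0 = labels.getD (m - 1) 0 := by
  rw [List.getLastD_eq_getLast?, List.getLast?_eq_getElem?, List.getD_eq_getElem?_getD]
  have hlt : (labels.take m).length = m := by simp; omega
  rw [hlt, List.getElem?_take_of_lt (by omega)]

theorem pvHeadDrop (labels : List Int) (m : Nat) :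
    (labels.drop m).headD 0 = labels.getD m 0 := by
  rw [List.getD_eq_getElem?_getD, ← List.head?_drop]
  cases labels.drop m <;> simp

theorem pvGetLastD_of_ne_nil (xs : List (List String)) (h : xs ≠ []) :
    xs.getLast h = xs.getLastD [] := by
  rw [List.getLastD_eq_getLast?, List.getLast?_eq_some_getLast h]
  rfl

theorem pvB_go : ∀ (fuel : Nat) (lists : List (List String)) (labels : List Int),
    labels.length ≤ fuel → labels.length ≤ lists.length →
    pvAltGo fuel lists labels = pvGrp lists labels := by
  intro fuel
  induction fuel with
  | zero =>
    intro lists labels hn _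
    rw [List.length_eq_zero_iff.mp (by omega : labels.length = 0)]
    simp [pvAltGo, pvGrp]
  | succ fuel ih =>
    intro lists labels hn hpre
    rw [pvAltGo]
    by_cases h0 : labels.length = 0
    · rw [if_pos h0]
      rw [List.length_eq_zero_iff.mp h0]
      simp [pvGrp]
    · rw [if_neg h0]
      by_cases h1 : labels.length = 1
      · rw [if_pos h1]
        obtain ⟨l, rfl⟩ : ∃ l, labels = [l] := by
          cases labels with
          | nil => simp at h1
          | cons a t =>
            cases t with
            | nil => exact ⟨a, rfl⟩
            | cons b t' => simp at h1
        have hg : pvGrp lists [l] = [lists.headD []] := by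
          rw [pvGrp]
          simp [pvGrp]
        rw [hg, PySem.List.pyGetD_zero]
        cases lists <;> simp
      · rw [if_neg h1]
        -- main divide-and-conquer case: 2 ≤ n
        have h2 : 2 ≤ labels.length := by omega
        set m : Nat := labels.length / 2 with hm
        have hm1 : 1 ≤ m := by omega
        have hmlt : m < labels.length := by omega
        -- normalise the four slices (simp zeta-reduces the ported local bindings)
        simp only [PySem.List.slice_to_natCast, PySem.List.slice_natCast]
        have hdlab : (labels.drop m).take (labels.length - m) = labels.drop m := by
          rw [show labels.length - m = (labels.drop m).length from by simp]
          exact List.take_length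
        rw [hdlab]
        -- recursive calls by strong induction
        have hleft := ih (lists.take m) (labels.take m)
          (by simp; omega) (by simp; omega)
        have hright := ih ((lists.drop m).take (labels.length - m)) (labels.drop m)
          (by simp; omega) (by simp; omega)
        rw [hleft, hright]
        rw [pvGrp_take (labels.drop m) (lists.drop m) (labels.length - m) (by simp)]
        -- the boundary-label test
        have hml : ((m : Int) - 1) = (((m - 1 : Nat)) : Int) := by omega
        rw [hml, PySem.List.pyGetD_natCast, PySem.List.pyGetD_natCast]
        -- the seam lemma
        have hseam := pvGrp_append (labels.take m) (lists.take m) (labels.drop m)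
          (lists.drop m)
          (by simp; omega)
          (by intro h; have := congrArg List.length h; simp only [List.length_take, List.length_nil] at this; omega)
          (by intro h; have := congrArg List.length h; simp only [List.length_drop, List.length_nil] at this; omega)
        rw [List.take_append_drop, List.take_append_drop] at hseam
        rw [hseam, pvGetDLast labels m hm1 (by omega), pvHeadDrop]
        by_cases hc : labels.getD (m - 1) 0 = labels.getD m 0
        · rw [if_pos hc, if_pos hc]
          have hLne : pvGrp (lists.take m) (labels.take m) ≠ [] := by
            obtain ⟨l, t, hlt⟩ : ∃ l t, labels.take m = l :: t := by
              cases h : labels.take m with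
              | nil => have := congrArg List.length h; simp only [List.length_take, List.length_nil] at this; omega
              | cons l t => exact ⟨l, t, rfl⟩
            rw [hlt]; exact pvGrp_ne_nil _ _ _
          have hRne : pvGrp (lists.drop m) (labels.drop m) ≠ [] := by
            obtain ⟨l, t, hlt⟩ : ∃ l t, labels.drop m = l :: t := by
              cases h : labels.drop m with
              | nil => have := congrArg List.length h; simp only [List.length_drop, List.length_nil] at this; omega
              | cons l t => exact ⟨l, t, rfl⟩
            rw [hlt]; exact pvGrp_ne_nil _ _ _
          rw [PySem.List.slice_to_neg_one, PySem.List.slice_from_one,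
              PySem.List.pyGetD_neg_one _ _ hLne, PySem.List.pyGetD_zero,
              pvGetLastD_of_ne_nil _ hLne]
          have : (pvGrp (lists.drop m) (labels.drop m)).getD 0 []
              = (pvGrp (lists.drop m) (labels.drop m)).headD [] := by
            cases pvGrp (lists.drop m) (labels.drop m) <;> simp
          rw [this]
          simp
        · rw [if_neg hc, if_neg hc]

theorem pvB_grp (lists : List (List String)) (labels : List Int)
    (hpre : labels.length ≤ lists.length) :
    list_re_classification_alt lists labels = pvGrp lists labels := by
  unfold list_re_classification_alt
  exact pvB_go labels.length lists labels (le_refl _) hpre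

-- ===== VERDICT (by name: the statement is the Claim_ definition above) =====
theorem list_re_classification_spec : Claim_equal_list_re_classification := by
  intro lists labels _ hpre
  unfold Spec_list_re_classification
  rw [pvA_grp, pvB_grp lists labels hpre]
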